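-- pv_equiv track=rewrite | github.com/honu-shell-utions/python | sandbox/xx_project_euler/801-850/801_xy_yx01.py | f
-- ===== SOURCE A (Python) =====
-- def f(n):
--     count = 0
--     xy = []
--     for x in range(1,n**2-n+1):
--         for y in range(1,n**2-n+1):
--             if x == y:
--                 count += 1
--                 xy.append((x,y))
--                 continue
--             lhs = pow(x,y,n)
--             rhs = pow(y,x,n)
--             if lhs == rhs:
--                 count += 1
--                 xy.append((x,y))
--     return count,xy
-- ===== SOURCE B (Python) =====
-- def f(n):
--     m = n * n - n
--     a = abs(n)
--     rows = [[pow(r, y, n) for y in range(1, m + 1)] for r in range(a)]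
--     xy = [(x, y)
--           for x in range(1, m + 1)
--           for y in range(1, m + 1)
--           if rows[x % a][y - 1] == rows[y % a][x - 1]]
--     return len(xy), xy
-- ===== Notes on version B (the rewrite author's own statement) =====
-- stated objective: alternative
-- what changed: B precomputes a table of rows pow(r, y, n) indexed by the residue r = x % abs(n) (exploiting that x^y mod n depends only on x mod |n|), so the pair loop does two table lookups instead of two modular exponentiations, and the x==y special case disappears since the lookup test is trivially true there; intended as faster (measured 4.3x at n=16) but unconfirmed at sizes where both time out, so claimed as alternative.
import Mathlib
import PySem

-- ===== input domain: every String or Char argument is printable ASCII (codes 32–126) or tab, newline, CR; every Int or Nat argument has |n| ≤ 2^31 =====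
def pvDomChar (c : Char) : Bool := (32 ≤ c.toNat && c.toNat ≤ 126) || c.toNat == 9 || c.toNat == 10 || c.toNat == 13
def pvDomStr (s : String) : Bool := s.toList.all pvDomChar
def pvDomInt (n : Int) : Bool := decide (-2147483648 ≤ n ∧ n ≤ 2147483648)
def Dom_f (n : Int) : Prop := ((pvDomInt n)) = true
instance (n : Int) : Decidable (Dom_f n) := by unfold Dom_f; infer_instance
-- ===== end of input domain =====

-- B replaces the per-pair modular exponentiations by lookups in a precomputed table of
-- rows pow(r, y, n) indexed by the residue r = x % abs(n) (intended as faster; measured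
-- 4.3x at n=16, unconfirmed at larger sizes where both exceed the time limit).

-- ===== PORT A =====
-- the exponents y, x drawn from range(1, …) are ≥ 1, so .toNat is exact there
def f (n : Int) : Int × (List (Int × Int)) :=
  (PySem.List.pyRange 1 (n ^ 2 - n + 1) 1).foldl (fun s x =>
    (PySem.List.pyRange 1 (n ^ 2 - n + 1) 1).foldl (fun t y =>
      if x == y then (t.1 + 1, t.2 ++ [(x, y)])
      else if PySem.Int.powMod x y.toNat n == PySem.Int.powMod y x.toNat n then
        (t.1 + 1, t.2 ++ [(x, y)])
      else t) s) (0, [])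

-- ===== PORT B =====
def f_alt (n : Int) : Int × (List (Int × Int)) :=
  let m : Int := n * n - n
  let a : Int := |n|
  let rows : List (List Int) :=
    (PySem.List.pyRange 0 a 1).map (fun r =>
      (PySem.List.pyRange 1 (m + 1) 1).map (fun y => PySem.Int.powMod r y.toNat n))
  let xy : List (Int × Int) :=
    (PySem.List.pyRange 1 (m + 1) 1).flatMap (fun x =>
      ((PySem.List.pyRange 1 (m + 1) 1).filter (fun y =>
        PySem.List.pyGetD (PySem.List.pyGetD rows (PySem.Int.mod x a) []) (y - 1) 0
          == PySem.List.pyGetD (PySem.List.pyGetD rows (PySem.Int.mod y a) []) (x - 1) 0)).map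
        (fun y => (x, y)))
  ((xy.length : Int), xy)

-- ===== PRECONDITION & SPEC =====
def Spec_f (n : Int) (out : Int × (List (Int × Int))) : Prop := out = f_alt n
instance (n : Int) (out : Int × (List (Int × Int))) : Decidable (Spec_f n out) := by unfold Spec_f; infer_instance

-- ===== CLAIM (what is proved, stated in full; the proofs are below) =====
def Claim_equal_f : Prop := ∀ (n : Int), Dom_f n → Spec_f n (f n)

-- ===== LEMMAS AND PROOFS =====

-- floor-mod (Python %) only depends on the argument's residue class
theorem pv_fmod_congr (a b n : Int) (h : a % n = b % n) : a.fmod n = b.fmod n := by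
  have hd : (n ∣ a) ↔ (n ∣ b) := by
    rw [Int.dvd_iff_emod_eq_zero, Int.dvd_iff_emod_eq_zero, h]
  have e1 : a - n * (a / n) = b - n * (b / n) := by
    rw [← Int.emod_def, ← Int.emod_def, h]
  simp only [Int.fmod_def, Int.fdiv_eq_ediv]
  split_ifs with h1 h2 h2
  · linear_combination e1
  · exact absurd (h1.imp id hd.mp) h2
  · exact absurd (h2.imp id hd.mpr) h1
  · linear_combination e1

-- pow(x, e, n) only depends on x modulo abs(n)
theorem pv_powMod_mod (x : Int) (e : Nat) (n : Int) :
    PySem.Int.powMod (PySem.Int.mod x |n|) e n = PySem.Int.powMod x e n := by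
  unfold PySem.Int.powMod PySem.Int.mod
  apply pv_fmod_congr
  refine Int.ModEq.pow e ?_
  show Int.ModEq n _ _
  calc (x.fmod |n|) % n = (x % |n|) % n := by
        rw [Int.fmod_eq_emod_of_nonneg _ (abs_nonneg n)]
    _ = x % n := Int.emod_emod_of_dvd _ ((dvd_abs n n).mpr dvd_rfl)

-- indexing a map over range(s, s+c) at offset i reads off g (s + i)
theorem pv_pyGetD_map_pyRange {α : Type} (s c i : Int) (g : Int → α) (d : α)
    (h0 : 0 ≤ i) (h1 : i < c) :
    PySem.List.pyGetD ((PySem.List.pyRange s (s + c) 1).map g) i d = g (s + i) := by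
  rw [PySem.List.pyRange_of_pos s (s + c) Int.one_pos]
  have hcnt : ((s + c - s + 1 - 1) / 1).toNat = c.toNat := by
    simp
  rw [if_pos (by omega : s < s + c), hcnt]
  rw [PySem.List.pyGetD_of_nonneg _ _ h0]
  have hlt : i.toNat < c.toNat := by omega
  rw [List.getD_eq_getElem _ _ (by simpa using hlt)]
  simp only [List.getElem_map, List.getElem_range]
  congr 1
  omega

-- A's inner loop body, rewritten with the disjunctive predicate
theorem pv_inner_step (n x : Int) (t : Int × List (Int × Int)) (y : Int) :
    (if x == y then (t.1 + 1, t.2 ++ [(x, y)])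
     else if PySem.Int.powMod x y.toNat n == PySem.Int.powMod y x.toNat n then
       (t.1 + 1, t.2 ++ [(x, y)])
     else t)
    = (if (x == y || (PySem.Int.powMod x y.toNat n == PySem.Int.powMod y x.toNat n)) then
        (t.1 + 1, t.2 ++ [(x, y)]) else t) := by
  by_cases hxy : x = y
  · simp [hxy]
  · simp [hxy]

-- count-and-collect fold = (count + #filter, acc ++ map over filter)
theorem pv_foldl_count {α β : Type} (p : α → Bool) (g : α → β) (l : List α)
    (c : Int) (acc : List β) :
    l.foldl (fun s x => if p x then (s.1 + 1, s.2 ++ [g x]) else s) (c, acc)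
      = (c + ((l.filter p).length : Int), acc ++ (l.filter p).map g) := by
  induction l generalizing c acc with
  | nil => simp
  | cons h t ih =>
    by_cases hp : p h
    · simp only [List.foldl_cons, hp, if_pos, List.filter_cons_of_pos hp]
      rw [ih]
      refine Prod.ext ?_ (by simp)
      simp only [List.length_cons]
      push_cast
      ring
    · simp [hp, List.filter_cons_of_neg hp, ih]

-- pair-accumulating fold = (count + Σ, acc ++ flatMap)
theorem pv_foldl_pair {α β : Type} (k : α → Int) (mm : α → List β) (l : List α)
    (c : Int) (acc : List β) :
    l.foldl (fun s x => (s.1 + k x, s.2 ++ mm x)) (c, acc)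
      = (c + (l.map k).sum, acc ++ l.flatMap mm) := by
  induction l generalizing c acc with
  | nil => simp
  | cons h t ih =>
    simp only [List.foldl_cons, ih, List.map_cons, List.sum_cons, List.flatMap_cons]
    refine Prod.ext (by simp; ring) (by simp)

-- the two per-pair tests agree on range(1, m+1)
theorem pv_pred_eq (n : Int) (x y : Int)
    (hx : 1 ≤ x ∧ x < (n * n - n) + 1) (hy : 1 ≤ y ∧ y < (n * n - n) + 1) :
    (x == y || (PySem.Int.powMod x y.toNat n == PySem.Int.powMod y x.toNat n))
    = (PySem.List.pyGetD
         (PySem.List.pyGetD ((PySem.List.pyRange 0 |n| 1).map (fun r =>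
            (PySem.List.pyRange 1 ((n * n - n) + 1) 1).map
              (fun y => PySem.Int.powMod r y.toNat n))) (PySem.Int.mod x |n|) [])
         (y - 1) 0
       == PySem.List.pyGetD
         (PySem.List.pyGetD ((PySem.List.pyRange 0 |n| 1).map (fun r =>
            (PySem.List.pyRange 1 ((n * n - n) + 1) 1).map
              (fun y => PySem.Int.powMod r y.toNat n))) (PySem.Int.mod y |n|) [])
         (x - 1) 0) := by
  have hn : n ≠ 0 := by rintro rfl; omega
  have ha : (0 : Int) < |n| := abs_pos.mpr hn
  have hrow : ∀ z : Int, PySem.List.pyGetD ((PySem.List.pyRange 0 |n| 1).map (fun r =>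
      (PySem.List.pyRange 1 ((n * n - n) + 1) 1).map
        (fun y => PySem.Int.powMod r y.toNat n))) (PySem.Int.mod z |n|) []
      = (PySem.List.pyRange 1 ((n * n - n) + 1) 1).map
          (fun y => PySem.Int.powMod (PySem.Int.mod z |n|) y.toNat n) := by
    intro z
    have := pv_pyGetD_map_pyRange 0 |n| (PySem.Int.mod z |n|)
      (fun r => (PySem.List.pyRange 1 ((n * n - n) + 1) 1).map
        (fun y => PySem.Int.powMod r y.toNat n)) []
      (PySem.Int.mod_nonneg z ha) (PySem.Int.mod_lt z ha)
    simpa using this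
  have hcell : ∀ z w : Int, 1 ≤ w → w < (n * n - n) + 1 →
      PySem.List.pyGetD ((PySem.List.pyRange 1 ((n * n - n) + 1) 1).map
        (fun y => PySem.Int.powMod (PySem.Int.mod z |n|) y.toNat n)) (w - 1) 0
      = PySem.Int.powMod z w.toNat n := by
    intro z w hw1 hw2
    have := pv_pyGetD_map_pyRange 1 (n * n - n) (w - 1)
      (fun y => PySem.Int.powMod (PySem.Int.mod z |n|) y.toNat n) 0
      (by omega) (by omega)
    rw [show (1 : Int) + (n * n - n) = (n * n - n) + 1 from by ring] at this
    rw [this]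
    rw [show (1 : Int) + (w - 1) = w from by ring]
    show PySem.Int.powMod (PySem.Int.mod z |n|) w.toNat n = PySem.Int.powMod z w.toNat n
    rw [pv_powMod_mod]
  rw [hrow x, hrow y, hcell x y hy.1 hy.2, hcell y x hx.1 hx.2]
  by_cases hxy : x = y
  · simp [hxy]
  · simp [hxy]

-- ===== VERDICT (by name: the statement is the Claim_ definition above) =====
theorem f_spec : Claim_equal_f := by
  intro n _
  show f n = f_alt n
  have hsq : n ^ 2 - n + 1 = (n * n - n) + 1 := by ring
  set L := PySem.List.pyRange 1 ((n * n - n) + 1) 1 with hL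
  set P : Int → Int → Bool := fun x y =>
    (x == y || (PySem.Int.powMod x y.toNat n == PySem.Int.powMod y x.toNat n)) with hP
  set Q : Int → Int → Bool := fun x y =>
    (PySem.List.pyGetD
       (PySem.List.pyGetD ((PySem.List.pyRange 0 |n| 1).map (fun r =>
          L.map (fun y => PySem.Int.powMod r y.toNat n))) (PySem.Int.mod x |n|) [])
       (y - 1) 0
     == PySem.List.pyGetD
       (PySem.List.pyGetD ((PySem.List.pyRange 0 |n| 1).map (fun r =>
          L.map (fun y => PySem.Int.powMod r y.toNat n))) (PySem.Int.mod y |n|) [])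
       (x - 1) 0) with hQ
  have hfilt : ∀ x ∈ L, L.filter (P x) = L.filter (Q x) := by
    intro x hx
    refine List.filter_congr ?_
    intro y hy
    rw [hL, PySem.List.mem_pyRange_one] at hx hy
    exact pv_pred_eq n x y hx hy
  have hA : f n = ((L.map (fun x => ((L.filter (P x)).length : Int))).sum,
      L.flatMap (fun x => (L.filter (P x)).map (fun y => (x, y)))) := by
    unfold f
    rw [hsq]
    have hinner : ∀ (s : Int × List (Int × Int)), ∀ x ∈ L,
        L.foldl (fun t y =>
          if x == y then (t.1 + 1, t.2 ++ [(x, y)])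
          else if PySem.Int.powMod x y.toNat n == PySem.Int.powMod y x.toNat n then
            (t.1 + 1, t.2 ++ [(x, y)])
          else t) s
        = (s.1 + ((L.filter (P x)).length : Int), s.2 ++ (L.filter (P x)).map (fun y => (x, y))) := by
      intro s x _
      have hstep : (fun (t : Int × List (Int × Int)) y =>
          if x == y then (t.1 + 1, t.2 ++ [(x, y)])
          else if PySem.Int.powMod x y.toNat n == PySem.Int.powMod y x.toNat n then
            (t.1 + 1, t.2 ++ [(x, y)])
          else t)
          = (fun (t : Int × List (Int × Int)) y =>
              if P x y then (t.1 + 1, t.2 ++ [(x, y)]) else t) := by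
        funext t y
        exact pv_inner_step n x t y
      rw [hstep, ← Prod.mk.eta (p := s), pv_foldl_count]
    rw [PySem.List.foldl_congr_mem L _
      (fun s x => (s.1 + ((L.filter (P x)).length : Int),
        s.2 ++ (L.filter (P x)).map (fun y => (x, y)))) (0, [])
      (by intro s x hx; exact hinner s x hx)]
    rw [pv_foldl_pair]
    simp
  have hB : f_alt n = (((L.flatMap (fun x => (L.filter (Q x)).map (fun y => (x, y)))).length : Int),
      L.flatMap (fun x => (L.filter (Q x)).map (fun y => (x, y)))) := by
    unfold f_alt
    rfl
  rw [hA, hB]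
  have hlist : L.flatMap (fun x => (L.filter (P x)).map (fun y => (x, y)))
      = L.flatMap (fun x => (L.filter (Q x)).map (fun y => (x, y))) := by
    apply List.flatMap_congr
    intro x hx
    rw [hfilt x hx]
  rw [← hlist]
  refine Prod.ext ?_ rfl
  show (L.map (fun x => ((L.filter (P x)).length : Int))).sum
      = ((L.flatMap (fun x => (L.filter (P x)).map (fun y => (x, y)))).length : Int)
  rw [List.length_flatMap]
  simp only [List.length_map]
  rw [Nat.cast_list_sum, List.map_map]
  rfl
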